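-- pv_equiv track=rewrite | github.com/sarang36910/Excel-Data-Validation-Cleaning-Tool | datasheet_validation.py | standardize_case
-- ===== SOURCE A (Python) =====
-- def standardize_case(val, allowed_values):
--     if not isinstance(val, str):
--         return val, False
--     clean_val = val.strip()
--     if clean_val in allowed_values:
--         return clean_val, clean_val != val
--     matches = [v for v in allowed_values if v.lower() == clean_val.lower()]
--     if not matches:
--         return val, False
--     # Prefer uppercase if possible, else first match
--     for m in matches:
--         if m.isupper():
--             return m, m != val
--     return matches[0], matches[0] != val
-- ===== SOURCE B (Python) =====
-- def standardize_case(val, allowed_values):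
--     if not isinstance(val, str):
--         return val, False
--     clean_val = val.strip()
--     low = clean_val.lower()
--     exact = False
--     first_ci = None
--     first_upper = None
--     for v in allowed_values:
--         if v == clean_val:
--             exact = True
--             break
--         if v.lower() == low:
--             if first_ci is None:
--                 first_ci = v
--             if first_upper is None and v.isupper():
--                 first_upper = v
--     if exact:
--         return clean_val, clean_val != val
--     if first_upper is not None:
--         return first_upper, first_upper != val
--     if first_ci is not None:
--         return first_ci, first_ci != val
--     return val, False
-- ===== Notes on version B (the rewrite author's own statement) =====
-- stated objective: alternative
-- what changed: B replaces A's three separate scans (membership test, case-insensitive filter, uppercase scan over the filtered list) with a single early-exiting pass that maintains exact/first_ci/first_upper accumulators and then returns by priority.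
import Mathlib
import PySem

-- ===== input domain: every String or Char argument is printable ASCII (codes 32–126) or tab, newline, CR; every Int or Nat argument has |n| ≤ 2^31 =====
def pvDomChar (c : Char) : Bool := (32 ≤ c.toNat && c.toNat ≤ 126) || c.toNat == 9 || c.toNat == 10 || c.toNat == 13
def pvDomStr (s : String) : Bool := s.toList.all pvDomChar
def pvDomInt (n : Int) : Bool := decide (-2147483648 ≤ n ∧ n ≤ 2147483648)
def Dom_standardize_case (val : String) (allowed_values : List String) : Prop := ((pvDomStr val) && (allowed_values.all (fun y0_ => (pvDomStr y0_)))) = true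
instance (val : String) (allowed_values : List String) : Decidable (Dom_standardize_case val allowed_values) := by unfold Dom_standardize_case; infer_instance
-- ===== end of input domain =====

-- B replaces A's three separate scans (exact membership, case-insensitive filter,
-- uppercase scan over the filtered list) with one early-exiting pass keeping
-- exact/first_ci/first_upper accumulators; same return value everywhere.

-- Python str.isupper() on the ASCII domain: at least one letter and no lowercase letter
-- (exact on Dom: ASCII cased characters are exactly the letters).
def pyIsUpper (s : String) : Bool :=
  s.toList.any PySem.Chars.isalpha && s.toList.all (fun c => !PySem.Chars.islower c)

-- ===== PORT A =====
def standardize_case (val : String) (allowed_values : List String) : String × Bool :=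
  let clean_val := PySem.Str.strip val
  if allowed_values.contains clean_val then
    (clean_val, clean_val != val)
  else
    let matches_ := allowed_values.filter
      (fun v => PySem.Str.lower v == PySem.Str.lower clean_val)
    match matches_ with
    | [] => (val, false)
    | m0 :: _ =>
      match matches_.find? (fun m => pyIsUpper m) with
      | some m => (m, m != val)
      | none => (m0, m0 != val)

-- ===== PORT B =====
-- the single for-loop of Source B: returns (exact, first_ci, first_upper); breaks on exact
def scanB (clean low : String) : List String → Option String → Option String →
    Bool × Option String × Option String
  | [], fc, fu => (false, fc, fu)
  | v :: rest, fc, fu =>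
    if v == clean then (true, fc, fu)
    else if PySem.Str.lower v == low then
      scanB clean low rest (if fc.isNone then some v else fc)
        (if fu.isNone && pyIsUpper v then some v else fu)
    else scanB clean low rest fc fu

def standardize_case_alt (val : String) (allowed_values : List String) : String × Bool :=
  let clean_val := PySem.Str.strip val
  let low := PySem.Str.lower clean_val
  match scanB clean_val low allowed_values none none with
  | (true, _, _) => (clean_val, clean_val != val)
  | (false, fc, fu) =>
    match fu with
    | some m => (m, m != val)
    | none =>
      match fc with
      | some m => (m, m != val)
      | none => (val, false)

-- ===== PRECONDITION & SPEC =====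
def Spec_standardize_case (val : String) (allowed_values : List String) (out : String × Bool) : Prop := out = standardize_case_alt val allowed_values
instance (val : String) (allowed_values : List String) (out : String × Bool) : Decidable (Spec_standardize_case val allowed_values out) := by unfold Spec_standardize_case; infer_instance

-- ===== CLAIM (what is proved, stated in full; the proofs are below) =====
def Claim_equal_standardize_case : Prop := ∀ (val : String) (allowed_values : List String), Dom_standardize_case val allowed_values → Spec_standardize_case val allowed_values (standardize_case val allowed_values)

-- ===== LEMMAS AND PROOFS =====

theorem scanB_fst (clean low : String) (l : List String) (fc fu : Option String) :
    (scanB clean low l fc fu).1 = l.contains clean := by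
  induction l generalizing fc fu with
  | nil => simp [scanB]
  | cons v rest ih =>
    simp only [scanB, List.contains_cons]
    by_cases h : v == clean
    · simp [h, eq_comm.mp (beq_iff_eq.mp h)]
    · have h' : (clean == v) = false := by
        simpa [BEq.comm (a := v)] using h
      split_ifs <;> simp [h', ih]

theorem scanB_of_not_mem (clean low : String) (l : List String) (fc fu : Option String)
    (h : clean ∉ l) :
    scanB clean low l fc fu =
      (false,
       fc.or (l.find? (fun v => PySem.Str.lower v == low)),
       fu.or (l.find? (fun v => PySem.Str.lower v == low && pyIsUpper v))) := by
  induction l generalizing fc fu with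
  | nil => simp [scanB]
  | cons v rest ih =>
    have hv : ¬ v == clean := by
      simp only [List.mem_cons] at h
      intro hb; exact h (Or.inl (by simpa [eq_comm] using (beq_iff_eq.mp hb)))
    have hrest : clean ∉ rest := fun hr => h (List.mem_cons_of_mem _ hr)
    simp only [scanB, if_neg hv]
    by_cases hci : (PySem.Str.lower v == low) = true
    · rw [if_pos hci, ih _ _ hrest]
      cases fc <;> cases fu <;>
        simp [List.find?_cons, hci, Option.or] <;>
        by_cases hu : pyIsUpper v <;> simp [hu, Option.or]
    · rw [if_neg hci, ih _ _ hrest]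
      simp [List.find?_cons, hci]

theorem find?_filter_head? (l : List String) (p : String → Bool) :
    (l.filter p).head? = l.find? p := by
  induction l with
  | nil => rfl
  | cons v rest ih =>
    by_cases h : p v <;> simp [List.filter_cons, List.find?_cons, h, ih]

theorem find?_filter' (l : List String) (p q : String → Bool) :
    (l.filter p).find? q = l.find? (fun v => p v && q v) := by
  induction l with
  | nil => rfl
  | cons v rest ih =>
    by_cases hp : p v
    · by_cases hq : q v <;> simp [List.filter_cons, List.find?_cons, hp, hq, ih]
    · simp [List.filter_cons, List.find?_cons, hp, ih]

-- ===== VERDICT (by name: the statement is the Claim_ definition above) =====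
theorem standardize_case_spec : Claim_equal_standardize_case := by
  intro val allowed_values _
  unfold Spec_standardize_case standardize_case standardize_case_alt
  set clean := PySem.Str.strip val with hclean
  by_cases hmem : clean ∈ allowed_values
  · have h1 : allowed_values.contains clean = true := by simpa using hmem
    have h2 := scanB_fst clean (PySem.Str.lower clean) allowed_values none none
    rw [h1] at h2
    rcases hsc : scanB clean (PySem.Str.lower clean) allowed_values none none with ⟨b, fc, fu⟩
    rw [hsc] at h2
    simp only at h2
    subst h2
    simp [hmem, hsc]
  · have h1 : ¬ allowed_values.contains clean = true := by simpa using hmem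
    have h2 := scanB_of_not_mem clean (PySem.Str.lower clean) allowed_values none none hmem
    have hfc : allowed_values.find? (fun v => PySem.Str.lower v == PySem.Str.lower clean) =
        (allowed_values.filter (fun v => PySem.Str.lower v == PySem.Str.lower clean)).head? :=
      (find?_filter_head? _ _).symm
    have hfu : allowed_values.find? (fun v => PySem.Str.lower v == PySem.Str.lower clean && pyIsUpper v) =
        (allowed_values.filter (fun v => PySem.Str.lower v == PySem.Str.lower clean)).find? pyIsUpper :=
      (find?_filter' _ _ _).symm
    rw [hfc, hfu] at h2
    rcases hF : allowed_values.filter (fun v => PySem.Str.lower v == PySem.Str.lower clean) with _ | ⟨m0, rest⟩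
    · rw [hF] at h2
      simp [hmem, h2, hfc, hfu, hF]
    · rw [hF] at h2
      rcases hU : (m0 :: rest).find? pyIsUpper with _ | m <;>
        rw [hU] at h2 <;> simp [hmem, h2, hfc, hfu, hF, hU]
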